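-- pv_equiv track=rewrite | github.com/greatmastermario/adventofcode2022 | advent2022/day03.py | sum_badges
-- ===== SOURCE A (Python) =====
-- def priority(char):
--     if char.islower():
--         return ord(char) - ord("a") + 1
--     elif char.isupper():
--         return ord(char) - ord("A") + 27
--     return 0
--
-- def sum_badges(sacks):
--     group = list()
--     badge_sum = 0
--     for index, sack in enumerate(sacks):
--         group.append([char for char in sack])
--         for group_sack in group:
--             group_sack.sort(key=ord)
--         if index % 3 == 2:
--             for char in group[0]:
--                 if char in group[1] and char in group[2]:
--                     badge_sum += priority(char)
--                     break
--             group.clear()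
--     return badge_sum
-- ===== SOURCE B (Python) =====
-- def priority(char):
--     if char.islower():
--         return ord(char) - ord("a") + 1
--     elif char.isupper():
--         return ord(char) - ord("A") + 27
--     return 0
--
-- def sum_badges(sacks):
--     total = 0
--     i = 0
--     while i + 3 <= len(sacks):
--         common = set(sacks[i]) & set(sacks[i + 1]) & set(sacks[i + 2])
--         if common:
--             total += priority(min(common))
--         i += 3
--     return total
-- ===== Notes on version B (the rewrite author's own statement) =====
-- stated objective: simpler
-- what changed: Replaces A's mutable group accumulator that re-sorts every collected sack on each iteration and then scans the sorted first sack with a break, by iterating complete chunks of three, intersecting the three sacks' character sets and taking priority(min(common)); the sorting disappears entirely.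
import Mathlib
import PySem

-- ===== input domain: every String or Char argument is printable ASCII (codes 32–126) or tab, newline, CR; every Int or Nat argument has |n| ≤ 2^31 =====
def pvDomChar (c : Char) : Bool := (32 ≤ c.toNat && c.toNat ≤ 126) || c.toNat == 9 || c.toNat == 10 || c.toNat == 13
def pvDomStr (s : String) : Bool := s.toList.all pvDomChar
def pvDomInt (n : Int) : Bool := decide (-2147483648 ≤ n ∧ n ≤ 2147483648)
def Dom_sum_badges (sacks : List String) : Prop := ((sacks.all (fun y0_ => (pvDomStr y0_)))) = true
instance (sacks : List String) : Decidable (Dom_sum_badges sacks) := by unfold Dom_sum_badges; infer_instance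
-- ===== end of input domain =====

-- B replaces A's mutable three-sack accumulator (repeated in-place sorts + linear scan with break)
-- by chunking the list into triples and taking the minimum of the three sacks' set intersection (objective: simpler).

-- ===== PORT A =====
-- shared helper `priority` (identical in Source A and Source B)
def pvPriority (c : Char) : Int :=
  if PySem.Chars.islower c then (c.toNat : Int) - ('a'.toNat : Int) + 1
  else if PySem.Chars.isupper c then (c.toNat : Int) - ('A'.toNat : Int) + 27
  else 0

-- the body of A's `for index, sack in enumerate(sacks)` loop; state = (group, badge_sum)
def pvStepA (st : List (List Char) × Int) (p : Int × String) : List (List Char) × Int :=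
  let group := st.1 ++ [p.2.toList]                                   -- group.append([char for char in sack])
  let group := group.map (fun g => PySem.List.sorted g (fun c => (c.toNat : Int)) false)  -- each group_sack.sort(key=ord)
  if PySem.Int.mod p.1 3 = 2 then
    let g0 := PySem.List.pyGetD group 0 []
    let g1 := PySem.List.pyGetD group 1 []
    let g2 := PySem.List.pyGetD group 2 []
    -- `for char in group[0]: if char in group[1] and char in group[2]: badge_sum += priority(char); break`
    match g0.find? (fun ch => g1.contains ch && g2.contains ch) with
    | some ch => ([], st.2 + pvPriority ch)                           -- add and break, then group.clear()
    | none => ([], st.2)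
  else (group, st.2)

def sum_badges (sacks : List String) : Int :=
  ((PySem.List.enumerate sacks 0).foldl pvStepA ([], 0)).2

-- ===== PORT B =====
-- contribution of one complete chunk of three sacks: min of the intersection of their char sets
def pvChunkB (a b c : String) : Int :=
  let common := PySem.Set.inter (PySem.Set.inter (PySem.Set.ofList a.toList) (PySem.Set.ofList b.toList)) (PySem.Set.ofList c.toList)
  match PySem.List.min? common (fun ch => ch) with      -- min(common); ord is injective, so order-safe
  | some m => pvPriority m
  | none => 0

-- Source B's `while i + 3 <= len(sacks)` index loop, as the obvious recursion consuming three sacks per step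
def pvLoopB : List String → Int → Int
  | a :: b :: c :: rest, total => pvLoopB rest (total + pvChunkB a b c)
  | _, total => total

def sum_badges_alt (sacks : List String) : Int := pvLoopB sacks 0

-- ===== PRECONDITION & SPEC =====
def Spec_sum_badges (sacks : List String) (out : Int) : Prop := out = sum_badges_alt sacks
instance (sacks : List String) (out : Int) : Decidable (Spec_sum_badges sacks out) := by unfold Spec_sum_badges; infer_instance

-- ===== CLAIM (what is proved, stated in full; the proofs are below) =====
def Claim_equal_sum_badges : Prop := ∀ (sacks : List String), Dom_sum_badges sacks → Spec_sum_badges sacks (sum_badges sacks)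

-- ===== LEMMAS AND PROOFS =====

theorem pv_char_le_iff (a b : Char) : a ≤ b ↔ (a.toNat : Int) ≤ (b.toNat : Int) := by
  rw [Char.le_def, UInt32.le_iff_toNat_le]
  exact (Int.ofNat_le ..).symm

-- find? on a key-sorted list returns a key-minimal satisfying element
theorem pv_find?_sorted_min {l : List Char} {p : Char → Bool} {x : Char}
    (hl : l.Pairwise (fun a b => ((fun c => (c.toNat : Int)) a) ≤ ((fun c => (c.toNat : Int)) b)))
    (hx : l.find? p = some x) :
    ∀ y ∈ l, p y = true → (x.toNat : Int) ≤ (y.toNat : Int) := by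
  induction l with
  | nil => simp at hx
  | cons h t ih =>
    rcases List.pairwise_cons.mp hl with ⟨hh, ht⟩
    by_cases hp : p h
    · rw [List.find?_cons_of_pos hp] at hx
      cases hx
      intro y hy _
      rcases List.mem_cons.mp hy with rfl | hyt
      · exact le_refl _
      · exact hh y hyt
    · rw [List.find?_cons_of_neg (by simpa using hp)] at hx
      intro y hy hpy
      rcases List.mem_cons.mp hy with rfl | hyt
      · exact absurd hpy hp
      · exact ih ht hx y hyt hpy

-- the per-chunk values agree
theorem pv_chunk_eq (a b c : String) :
    (match (PySem.List.sorted a.toList (fun c => (c.toNat : Int)) false).find?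
        (fun ch => (PySem.List.sorted b.toList (fun c => (c.toNat : Int)) false).contains ch
                && (PySem.List.sorted c.toList (fun c => (c.toNat : Int)) false).contains ch) with
     | some ch => pvPriority ch
     | none => (0 : Int)) = pvChunkB a b c := by
  unfold pvChunkB
  set key : Char → Int := fun c => (c.toNat : Int) with hkey
  set sa := PySem.List.sorted a.toList key false with hsa
  set sb := PySem.List.sorted b.toList key false with hsb
  set sc := PySem.List.sorted c.toList key false with hsc
  set p : Char → Bool := fun ch => sb.contains ch && sc.contains ch with hp
  set common := PySem.Set.inter (PySem.Set.inter (PySem.Set.ofList a.toList) (PySem.Set.ofList b.toList)) (PySem.Set.ofList c.toList) with hcommon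
  have hmem : ∀ y : Char, y ∈ common ↔ (y ∈ a.toList ∧ y ∈ b.toList ∧ y ∈ c.toList) := by
    intro y
    simp [hcommon, PySem.Set.mem_inter, PySem.Set.mem_ofList, and_assoc]
  have hpiff : ∀ y : Char, p y = true ↔ (y ∈ b.toList ∧ y ∈ c.toList) := by
    intro y
    simp [hp, hsb, hsc, PySem.List.mem_sorted]
  cases hfind : sa.find? p with
  | none =>
    have hnone : common = [] := by
      rw [List.eq_nil_iff_forall_not_mem]
      intro y hy
      rcases (hmem y).mp hy with ⟨hya, hyb, hyc⟩
      have : y ∈ sa := by rw [hsa, PySem.List.mem_sorted]; exact hya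
      have := List.find?_eq_none.mp hfind y this
      exact this ((hpiff y).mpr ⟨hyb, hyc⟩)
    rw [hnone]
    simp [PySem.List.min?]
  | some x =>
    have hxmem : x ∈ sa := List.mem_of_find?_eq_some hfind
    have hpx : p x = true := List.find?_some hfind
    have hxa : x ∈ a.toList := by rw [hsa, PySem.List.mem_sorted] at hxmem; exact hxmem
    have hxc : x ∈ common := (hmem x).mpr ⟨hxa, (hpiff x).mp hpx⟩
    cases hmin : PySem.List.min? common (fun ch => ch) with
    | none =>
      rw [PySem.List.min?_eq_none_iff] at hmin
      rw [hmin] at hxc; simp at hxc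
    | some m =>
      have hmm : m ∈ common := PySem.List.min?_mem hmin
      have hml : m ≤ x := PySem.List.min?_isMin hmin x hxc
      have hxl : (x.toNat : Int) ≤ (m.toNat : Int) := by
        rcases (hmem m).mp hmm with ⟨hma, hmb, hmc⟩
        refine pv_find?_sorted_min ?_ hfind m ?_ ((hpiff m).mpr ⟨hmb, hmc⟩)
        · rw [hsa]; exact PySem.List.sorted_pairwise _ _
        · rw [hsa, PySem.List.mem_sorted]; exact hma
      have : x = m := le_antisymm ((pv_char_le_iff x m).mpr hxl) hml
      rw [this]
      simp only [hmin]

-- the loop invariant: from an empty group at an index ≡ 0 (mod 3), A's fold computes B's recursion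
theorem pv_loop_eq : ∀ (l : List String) (s acc : Int), PySem.Int.mod s 3 = 0 →
    ((PySem.List.enumerate l s).foldl pvStepA ([], acc)).2 = pvLoopB l acc
  | [], s, acc, h => by simp [pvLoopB, PySem.List.enumerate_nil]
  | [a], s, acc, h => by
    rw [PySem.Int.mod_eq_emod_of_pos (by norm_num)] at h
    have h0 : ¬ s % 3 = 2 := by omega
    simp [PySem.List.enumerate_cons, PySem.List.enumerate_nil, pvStepA, h0, pvLoopB]
  | [a, b], s, acc, h => by
    rw [PySem.Int.mod_eq_emod_of_pos (by norm_num)] at h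
    have h0 : ¬ s % 3 = 2 := by omega
    have h1 : ¬ (s + 1) % 3 = 2 := by omega
    simp [PySem.List.enumerate_cons, PySem.List.enumerate_nil, pvStepA, h0, h1, pvLoopB]
  | a :: b :: c :: rest, s, acc, h => by
    rw [PySem.Int.mod_eq_emod_of_pos (by norm_num)] at h
    have h0 : ¬ s % 3 = 2 := by omega
    have h1 : ¬ (s + 1) % 3 = 2 := by omega
    have h2 : (s + 1 + 1) % 3 = 2 := by omega
    have h3 : PySem.Int.mod (s + 1 + 1 + 1) 3 = 0 := by
      rw [PySem.Int.mod_eq_emod_of_pos (by norm_num)]; omega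
    rw [PySem.List.enumerate_cons, PySem.List.enumerate_cons, PySem.List.enumerate_cons]
    rw [List.foldl_cons, List.foldl_cons, List.foldl_cons]
    rw [show pvStepA ([], acc) (s, a) = ([PySem.List.sorted a.toList (fun c => (c.toNat : Int)) false], acc) by
      simp [pvStepA, h0]]
    rw [show pvStepA ([PySem.List.sorted a.toList (fun c => (c.toNat : Int)) false], acc) (s + 1, b)
        = ([PySem.List.sorted a.toList (fun c => (c.toNat : Int)) false,
            PySem.List.sorted b.toList (fun c => (c.toNat : Int)) false], acc) by
      simp [pvStepA, h1, PySem.List.sorted_sorted]]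
    rw [show pvStepA ([PySem.List.sorted a.toList (fun c => (c.toNat : Int)) false,
            PySem.List.sorted b.toList (fun c => (c.toNat : Int)) false], acc) (s + 1 + 1, c)
        = ([], acc + pvChunkB a b c) by
      simp only [pvStepA, List.map_append, List.map_cons, List.map_nil,
        PySem.List.sorted_sorted]
      rw [show PySem.Int.mod (s + 1 + 1) 3 = 2 by
        rw [PySem.Int.mod_eq_emod_of_pos (by norm_num)]; exact h2]
      rw [if_pos rfl]
      rw [← pv_chunk_eq a b c]
      simp [PySem.List.pyGetD, PySem.List.pyGet?, PySem.List.pyIdx?]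
      cases List.find? (fun ch => decide (ch ∈ b.toList) && decide (ch ∈ c.toList))
          (PySem.List.sorted a.toList (fun c => (c.toNat : Int)) false) <;> simp]
    rw [pv_loop_eq rest (s + 1 + 1 + 1) (acc + pvChunkB a b c) h3]
    simp [pvLoopB]

-- ===== VERDICT (by name: the statement is the Claim_ definition above) =====
theorem sum_badges_spec : Claim_equal_sum_badges := by
  intro sacks _
  unfold Spec_sum_badges sum_badges sum_badges_alt
  exact pv_loop_eq sacks 0 0 (by decide)
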